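-- pv_equiv track=rewrite | github.com/rifa8/Basic-Programming-Part4 | problem2/main.py | draw_xyz
-- ===== SOURCE A (Python) =====
-- def draw_xyz(N):
--     pattern = ''
--     for i in range(1, N+1):
--         for j in range(1, N+1):
--             hasil = (i-1)*N + j
--             if hasil % 3 == 0:
--                 pattern +='X '
--             elif hasil % 2 == 0:
--                 pattern +='Z '
--             else:
--                 pattern +='Y '
--         pattern+='\n'
--     return pattern
-- ===== SOURCE B (Python) =====
-- def draw_xyz(N):
--     if N <= 0:
--         return ''
--     # table indexed by k % 6 reproduces the X-over-Z priority of the mod tests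
--     T = ['X ', 'Y ', 'Z ', 'X ', 'Z ', 'Y ']
--     flat = [T[k % 6] for k in range(1, N * N + 1)]
--     return ''.join(''.join(flat[r * N:(r + 1) * N]) + '\n' for r in range(N))
-- ===== Notes on version B (the rewrite author's own statement) =====
-- stated objective: alternative
-- what changed: Replaces the nested loops with per-cell mod-two/mod-three tests and incremental string concatenation by a six-entry lookup table indexed by the cell number mod six, a flat table-driven list of all N*N labels, and a reshape that joins N-sized slices into rows (with an early empty result for non-positive N); str.join replaces repeated += concatenation.
import Mathlib
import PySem

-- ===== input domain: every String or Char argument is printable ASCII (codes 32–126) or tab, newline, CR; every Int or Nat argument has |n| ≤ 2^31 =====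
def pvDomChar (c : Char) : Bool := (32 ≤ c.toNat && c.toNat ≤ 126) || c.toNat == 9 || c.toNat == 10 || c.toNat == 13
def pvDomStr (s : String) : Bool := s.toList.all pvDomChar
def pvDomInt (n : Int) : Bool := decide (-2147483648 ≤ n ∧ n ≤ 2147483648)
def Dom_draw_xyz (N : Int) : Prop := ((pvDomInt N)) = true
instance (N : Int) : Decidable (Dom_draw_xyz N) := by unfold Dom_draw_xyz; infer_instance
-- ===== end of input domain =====

-- B replaces A's per-cell mod-3/mod-2 branching with incremental concatenation by a
-- k % 6 lookup table, a flat list of all N*N labels and a slice-into-rows reshape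
-- (objective: alternative; same O(N^2) cost).
-- Ports work on List Char (Lean's String.append is opaque to the kernel); '%' on Int
-- with the positive literal divisors 2/3/6 coincides with Python's '%' exactly.

-- ===== PORT A =====
def draw_xyz (N : Int) : String :=
  String.ofList <|
    (PySem.List.pyRange 1 (N+1) 1).foldl (fun pattern i =>
      ((PySem.List.pyRange 1 (N+1) 1).foldl (fun p j =>
        let hasil := (i-1)*N + j
        if hasil % 3 == 0 then p ++ "X ".toList
        else if hasil % 2 == 0 then p ++ "Z ".toList
        else p ++ "Y ".toList) pattern) ++ "\n".toList) []

-- ===== PORT B =====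
-- T = ['X ', 'Y ', 'Z ', 'X ', 'Z ', 'Y ']
def pvTable : List (List Char) :=
  ["X ".toList, "Y ".toList, "Z ".toList, "X ".toList, "Z ".toList, "Y ".toList]

def draw_xyz_alt (N : Int) : String :=
  if N ≤ 0 then "" else
  let flat := (PySem.List.pyRange 1 (N*N+1) 1).map
    (fun k => PySem.List.pyGetD pvTable (k % 6) [])
  String.ofList <|
    PySem.Chars.join [] ((PySem.List.pyRange 0 N 1).map (fun r =>
      PySem.Chars.join [] (PySem.List.slice flat (some (r*N)) (some ((r+1)*N))) ++ "\n".toList))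

-- ===== PRECONDITION & SPEC =====
def Spec_draw_xyz (N : Int) (out : String) : Prop := out = draw_xyz_alt N
instance (N : Int) (out : String) : Decidable (Spec_draw_xyz N out) := by unfold Spec_draw_xyz; infer_instance

-- ===== CLAIM (what is proved, stated in full; the proofs are below) =====
def Claim_equal_draw_xyz : Prop := ∀ (N : Int), Dom_draw_xyz N → Spec_draw_xyz N (draw_xyz N)

-- ===== LEMMAS AND PROOFS =====

-- the label A assigns to cell number k
def pvLabel (k : Int) : List Char :=
  if k % 3 == 0 then "X ".toList else if k % 2 == 0 then "Z ".toList else "Y ".toList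

-- B's 6-entry table, read at k % 6, produces exactly A's label for cell k
theorem pvTable_eq_label (k : Int) : PySem.List.pyGetD pvTable (k % 6) [] = pvLabel k := by
  have h6 : k % 6 = 0 ∨ k % 6 = 1 ∨ k % 6 = 2 ∨ k % 6 = 3 ∨ k % 6 = 4 ∨ k % 6 = 5 := by omega
  simp only [pvLabel]
  rcases h6 with h | h | h | h | h | h
  · rw [h, show (k % 3 : Int) = 0 by omega]; simp [pvTable, PySem.List.pyGetD]
  · rw [h, show (k % 3 : Int) = 1 by omega, show (k % 2 : Int) = 1 by omega]
    simp [pvTable, PySem.List.pyGetD]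
  · rw [h, show (k % 3 : Int) = 2 by omega, show (k % 2 : Int) = 0 by omega]
    simp [pvTable, PySem.List.pyGetD]
  · rw [h, show (k % 3 : Int) = 0 by omega]; simp [pvTable, PySem.List.pyGetD]
  · rw [h, show (k % 3 : Int) = 1 by omega, show (k % 2 : Int) = 0 by omega]
    simp [pvTable, PySem.List.pyGetD]
  · rw [h, show (k % 3 : Int) = 2 by omega, show (k % 2 : Int) = 1 by omega]
    simp [pvTable, PySem.List.pyGetD]

-- ''.join is flatten
theorem pv_join_nil_flatten (xs : List (List Char)) : PySem.Chars.join [] xs = xs.flatten := by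
  induction xs with
  | nil => rfl
  | cons h t ih =>
    cases t with
    | nil => simp [PySem.Chars.join, List.intercalate]
    | cons h2 t2 => rw [PySem.Chars.join_cons_cons]; simp at ih ⊢; rw [ih]

theorem pv_drop_range (m n : ℕ) : (List.range n).drop m = (List.range (n - m)).map (m + ·) := by
  apply List.ext_getElem
  · simp
  · intro i h1 h2; simp

-- A's whole output as a flatten-of-rows normal form
theorem pvA_flatten (N : Int) :
    (PySem.List.pyRange 1 (N+1) 1).foldl (fun pattern i =>
      ((PySem.List.pyRange 1 (N+1) 1).foldl (fun p j =>
        let hasil := (i-1)*N + j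
        if hasil % 3 == 0 then p ++ "X ".toList
        else if hasil % 2 == 0 then p ++ "Z ".toList
        else p ++ "Y ".toList) pattern) ++ "\n".toList) []
    = ((PySem.List.pyRange 1 (N+1) 1).map (fun i =>
        ((PySem.List.pyRange 1 (N+1) 1).map (fun j => pvLabel ((i-1)*N + j))).flatten
          ++ "\n".toList)).flatten := by
  have hinner : ∀ (i : Int) (pat : List Char),
      (PySem.List.pyRange 1 (N+1) 1).foldl (fun p j =>
        let hasil := (i-1)*N + j
        if hasil % 3 == 0 then p ++ "X ".toList
        else if hasil % 2 == 0 then p ++ "Z ".toList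
        else p ++ "Y ".toList) pat
      = pat ++ ((PySem.List.pyRange 1 (N+1) 1).map (fun j => pvLabel ((i-1)*N + j))).flatten := by
    intro i pat
    have hfm := PySem.List.foldl_append_eq_flatMap (g := fun j => pvLabel ((i-1)*N + j))
      (l := PySem.List.pyRange 1 (N+1) 1) (acc := pat)
    rw [List.flatMap_def] at hfm
    rw [← hfm]
    apply PySem.List.foldl_congr_mem
    intro acc x hx
    simp only [pvLabel]
    split_ifs <;> rfl
  calc (PySem.List.pyRange 1 (N+1) 1).foldl (fun pattern i =>
      ((PySem.List.pyRange 1 (N+1) 1).foldl (fun p j =>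
        let hasil := (i-1)*N + j
        if hasil % 3 == 0 then p ++ "X ".toList
        else if hasil % 2 == 0 then p ++ "Z ".toList
        else p ++ "Y ".toList) pattern) ++ "\n".toList) []
      = (PySem.List.pyRange 1 (N+1) 1).foldl (fun pattern i =>
        pattern ++ (((PySem.List.pyRange 1 (N+1) 1).map (fun j => pvLabel ((i-1)*N + j))).flatten
          ++ "\n".toList)) [] := by
        apply PySem.List.foldl_congr_mem
        intro acc x hx
        rw [hinner]
        simp
    _ = _ := by
        rw [PySem.List.foldl_append_eq_flatMap, List.flatMap_def]
        simp

-- B's slice of the flat label list is exactly row r+1's labels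
theorem pvSlice_row (N r : Int) (hr0 : 0 ≤ r) (hrN : r < N) :
    PySem.List.slice ((PySem.List.pyRange 1 (N*N+1) 1).map pvLabel) (some (r*N)) (some ((r+1)*N))
    = (PySem.List.pyRange 1 (N+1) 1).map (fun j => pvLabel (r*N + j)) := by
  obtain ⟨n, rfl⟩ : ∃ n : ℕ, N = (n : Int) := ⟨N.toNat, by omega⟩
  obtain ⟨p, rfl⟩ : ∃ p : ℕ, r = (p : Int) := ⟨r.toNat, by omega⟩
  have hpn : p < n := by exact_mod_cast hrN
  rw [PySem.List.pyRange_one 1 ((n:Int)*n+1), PySem.List.pyRange_one 1 ((n:Int)+1)]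
  have h1 : (((n:Int)*n+1) - 1).toNat = n*n := by omega
  have h2 : (((n:Int)+1) - 1).toNat = n := by omega
  rw [h1, h2]
  have ha : (p:Int)*n = ((p*n : ℕ) : Int) := by push_cast; ring
  have hb : ((p:Int)+1)*n = (((p+1)*n : ℕ) : Int) := by push_cast; ring
  rw [ha, hb, PySem.List.slice_natCast]
  simp only [← List.map_drop, ← List.map_take]
  rw [pv_drop_range]
  have hle : p*n + n ≤ n*n := by
    have h := Nat.mul_le_mul_right n hpn
    simpa [Nat.add_mul] using h
  rw [show ((p+1)*n - p*n) = n from (by simp [Nat.add_mul])]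
  simp only [← List.map_take]
  rw [List.take_range, show min n (n*n - p*n) = n from (by omega)]
  rw [List.map_map, List.map_map, List.map_map]
  apply List.map_congr_left
  intro k hk
  simp only [Function.comp]
  congr 1
  push_cast
  ring

-- ===== VERDICT (by name: the statement is the Claim_ definition above) =====
theorem draw_xyz_spec : Claim_equal_draw_xyz := by
  intro N _
  unfold Spec_draw_xyz draw_xyz draw_xyz_alt
  by_cases hN : N ≤ 0
  · rw [if_pos hN, PySem.List.pyRange_one_eq_nil (by omega)]
    rfl
  rw [if_neg hN]
  congr 1
  rw [pvA_flatten]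
  rw [show ((PySem.List.pyRange 1 (N*N+1) 1).map (fun k => PySem.List.pyGetD pvTable (k % 6) []))
      = (PySem.List.pyRange 1 (N*N+1) 1).map pvLabel from
    List.map_congr_left (fun k _ => pvTable_eq_label k)]
  rw [pv_join_nil_flatten]
  have hmap : ((PySem.List.pyRange 0 N 1).map (fun r =>
      PySem.Chars.join [] (PySem.List.slice ((PySem.List.pyRange 1 (N*N+1) 1).map pvLabel)
        (some (r*N)) (some ((r+1)*N))) ++ "\n".toList))
      = (PySem.List.pyRange 0 N 1).map (fun r =>
        ((PySem.List.pyRange 1 (N+1) 1).map (fun j => pvLabel (r*N + j))).flatten ++ "\n".toList) := by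
    apply List.map_congr_left
    intro r hr
    rw [PySem.List.mem_pyRange_one] at hr
    rw [pvSlice_row N r hr.1 hr.2, pv_join_nil_flatten]
  rw [hmap]
  -- reindex rows: i ∈ range(1, N+1) versus r ∈ range(0, N), i = r + 1
  rw [PySem.List.pyRange_one 1 (N+1), PySem.List.pyRange_one 0 N]
  rw [show ((N+1) - 1).toNat = (N - 0).toNat from (by omega)]
  congr 1
  rw [List.map_map, List.map_map]
  apply List.map_congr_left
  intro t ht
  simp only [Function.comp]
  congr 2
  apply List.map_congr_left
  intro j hj
  congr 1
  ring
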